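-- pv_equiv track=rewrite | github.com/Arkadiy-Garber/BagOfTricks | cytoscan.py | checkDFE1
-- ===== SOURCE A (Python) =====
-- def checkDFE1(ls):
--     count = 0
--     uniqueLS = []
--     for i in ls:
--         hmm = i.split("|")[0]
--         if hmm not in uniqueLS:
--             uniqueLS.append(hmm)
--             if hmm in ["DFE_0461", "DFE_0462", "DFE_0463", "DFE_0464", "DFE_0465"]:
--                 count += 1
--     return count
-- ===== SOURCE B (Python) =====
-- def checkDFE1(ls):
--     # Loop over the five fixed target IDs and count how many of them occur
--     # as a "|"-prefix anywhere in ls; correct because A counts each target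
--     # prefix at most once (uniqueLS), so A's count = number of targets present.
--     return sum(any(i.split("|")[0] == t for i in ls)
--                for t in ("DFE_0461", "DFE_0462", "DFE_0463", "DFE_0464", "DFE_0465"))
-- ===== Notes on version B (the rewrite author's own statement) =====
-- stated objective: faster
-- what changed: Inverts the traversal: instead of scanning ls once while maintaining a growing seen-list (with its linear membership scans) and a conditional counter, B loops over the five fixed target IDs and counts those that occur as a prefix anywhere in ls (sum of any-scans), dropping the uniqueLS deduplication entirely.
import Mathlib
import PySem

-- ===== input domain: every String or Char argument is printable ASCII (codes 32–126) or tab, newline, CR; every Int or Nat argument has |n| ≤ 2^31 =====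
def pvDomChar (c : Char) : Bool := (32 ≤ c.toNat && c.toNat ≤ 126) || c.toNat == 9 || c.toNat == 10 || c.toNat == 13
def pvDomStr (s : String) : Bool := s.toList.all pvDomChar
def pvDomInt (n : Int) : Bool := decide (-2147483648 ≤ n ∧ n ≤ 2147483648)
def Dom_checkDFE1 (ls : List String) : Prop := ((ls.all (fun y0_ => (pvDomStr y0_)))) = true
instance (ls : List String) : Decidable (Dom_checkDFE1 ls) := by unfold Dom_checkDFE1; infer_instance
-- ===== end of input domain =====

-- B inverts the traversal: it loops over the five fixed target IDs and counts those
-- occurring as a "|"-prefix anywhere in ls, dropping A's uniqueLS deduplication (objective: alternative).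

-- ===== PORT A =====
-- i.split("|")[0]: the separator is nonempty so split? is some, and Python's split
-- always yields a nonempty list, so index 0 is the head.
def pvPrefix (i : String) : String := ((PySem.Str.split? i "|").getD []).headD ""

def pvTargets : List String := ["DFE_0461", "DFE_0462", "DFE_0463", "DFE_0464", "DFE_0465"]

def checkDFE1 (ls : List String) : Int :=
  (ls.foldl
    (fun (st : Int × List String) i =>
      let hmm := pvPrefix i
      if hmm ∈ st.2 then st
      else (st.1 + (if hmm ∈ pvTargets then 1 else 0), st.2 ++ [hmm]))
    (0, [])).1

-- ===== PORT B =====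
-- sum(any(i.split("|")[0] == t for i in ls) for t in targets)
def checkDFE1_alt (ls : List String) : Int :=
  pvTargets.foldl
    (fun acc t => acc + (if ls.any (fun i => pvPrefix i == t) then 1 else 0))
    (0 : Int)

-- ===== PRECONDITION & SPEC =====
def Spec_checkDFE1 (ls : List String) (out : Int) : Prop := out = checkDFE1_alt ls
instance (ls : List String) (out : Int) : Decidable (Spec_checkDFE1 ls out) := by unfold Spec_checkDFE1; infer_instance

-- ===== CLAIM (what is proved, stated in full; the proofs are below) =====
def Claim_equal_checkDFE1 : Prop := ∀ (ls : List String), Dom_checkDFE1 ls → Spec_checkDFE1 ls (checkDFE1 ls)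

-- ===== LEMMAS AND PROOFS =====

-- B's fold over the targets is a countP of the predicate.
theorem foldl_ite_countP (p : String → Bool) (ts : List String) (a : Int) :
    ts.foldl (fun acc t => acc + (if p t then 1 else 0)) a
      = a + (ts.countP p : Int) := by
  induction ts generalizing a with
  | nil => simp
  | cons t ts ih =>
    by_cases h : p t <;> simp [List.countP_cons, h, ih] <;> ring

-- Adjoining one fresh element to the seen list bumps the target count by its membership.
theorem countP_or_fresh (s : List String) (p : String) (hp : p ∉ s) :
    ∀ (ts : List String), ts.Nodup →
    ts.countP (fun t => decide (t ∈ s) || decide (t = p))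
      = ts.countP (fun t => decide (t ∈ s)) + (if p ∈ ts then 1 else 0) := by
  intro ts hn
  induction ts with
  | nil => simp
  | cons a ts ih =>
    rcases List.nodup_cons.mp hn with ⟨ha, hts⟩
    by_cases hap : a = p
    · subst hap
      simp [List.countP_cons, hp, ha, ih hts]
    · by_cases has : a ∈ s <;>
        simp [List.countP_cons, has, hap, ih hts, Ne.symm hap] <;> ring

-- A's loop invariant: starting from seen s and its target count, the fold produces
-- the updated seen set and its target count.
theorem checkDFE1_loop_inv (xs : List String) (s : PySem.Set String) :
    xs.foldl
      (fun (st : Int × List String) i =>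
        let hmm := pvPrefix i
        if hmm ∈ st.2 then st
        else (st.1 + (if hmm ∈ pvTargets then 1 else 0), st.2 ++ [hmm]))
      ((pvTargets.countP (fun t => decide (t ∈ s)) : Int), s)
    = ((pvTargets.countP (fun t => decide (t ∈ PySem.Set.update s (xs.map pvPrefix))) : Int),
       PySem.Set.update s (xs.map pvPrefix)) := by
  induction xs generalizing s with
  | nil => rfl
  | cons x xs ih =>
    simp only [List.foldl_cons, List.map_cons]
    have hupd : PySem.Set.update s (pvPrefix x :: xs.map pvPrefix)
        = PySem.Set.update (PySem.Set.add s (pvPrefix x)) (xs.map pvPrefix) := by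
      simp [PySem.Set.update]
    by_cases h : pvPrefix x ∈ s
    · have hadd : PySem.Set.add s (pvPrefix x) = s := by
        unfold PySem.Set.add
        rw [if_pos (by simpa [PySem.Set.contains] using h)]
      simp only [h, if_pos, hupd, hadd]
      exact ih s
    · have hadd : PySem.Set.add s (pvPrefix x) = s ++ [pvPrefix x] := by
        unfold PySem.Set.add
        rw [if_neg (by simp [PySem.Set.contains, h])]
      have hcnt : (pvTargets.countP (fun t => decide (t ∈ s)) : Int)
            + (if pvPrefix x ∈ pvTargets then 1 else 0)
          = (pvTargets.countP (fun t => decide (t ∈ s ++ [pvPrefix x])) : Int) := by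
        have hbridge : pvTargets.countP (fun t => decide (t ∈ s ++ [pvPrefix x]))
            = pvTargets.countP (fun t => decide (t ∈ s) || decide (t = pvPrefix x)) := by
          apply List.countP_congr
          intro t _
          simp [List.mem_append]
        rw [hbridge, countP_or_fresh s (pvPrefix x) h pvTargets (by decide)]
        by_cases ht : pvPrefix x ∈ pvTargets <;> simp [ht]
      simp only [h, if_neg, not_false_iff, hupd, hadd]
      rw [hcnt]
      exact ih (s ++ [pvPrefix x])

-- ===== VERDICT (by name: the statement is the Claim_ definition above) =====
theorem checkDFE1_spec : Claim_equal_checkDFE1 := by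
  intro ls _
  unfold Spec_checkDFE1 checkDFE1 checkDFE1_alt
  have h := checkDFE1_loop_inv ls ([] : PySem.Set String)
  have h0 : (pvTargets.countP (fun t => decide (t ∈ ([] : List String))) : Int) = 0 := by decide
  rw [h0] at h
  have h1 := congrArg Prod.fst h
  rw [foldl_ite_countP]
  simp only [zero_add] at h1 ⊢
  rw [h1]
  simp only [Int.natCast_inj]
  apply List.countP_congr
  intro t _
  rw [show PySem.Set.update ([] : PySem.Set String) (ls.map pvPrefix)
      = PySem.Set.ofList (ls.map pvPrefix) from (PySem.Set.update_nil_left _)]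
  rw [Bool.eq_iff_iff]
  simp only [decide_eq_true_eq, PySem.Set.mem_ofList, List.mem_map,
    List.any_eq_true, beq_iff_eq]
  aesop
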